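-- pv_equiv track=rewrite | github.com/sl2902/helsinki_mooc | mooc-programming-22/part07-02_special_characters/src/special_characters.py | separate_characters
-- ===== SOURCE A (Python) =====
-- def separate_characters(my_string: str) -> tuple:
--     import string
--     asc_str, punc_str, oth_str = '', '', ''
--     for c in my_string:
--         if c in string.ascii_letters:
--             asc_str += c
--         elif c in string.punctuation:
--             punc_str += c
--         else:
--             oth_str += c
--     return asc_str, punc_str, oth_str
-- ===== SOURCE B (Python) =====
-- import string
--
-- def separate_characters(my_string: str) -> tuple:
--     asc = ''.join(c for c in my_string if c in string.ascii_letters)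
--     punc = ''.join(c for c in my_string if c in string.punctuation)
--     oth = ''.join(c for c in my_string
--                   if c not in string.ascii_letters and c not in string.punctuation)
--     return asc, punc, oth
-- ===== Notes on version B (the rewrite author's own statement) =====
-- stated objective: idiomatic
-- what changed: A classifies each character in one loop with three mutable accumulators; B makes three independent filtering passes over the string, one per bucket, joining each comprehension.
import Mathlib
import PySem

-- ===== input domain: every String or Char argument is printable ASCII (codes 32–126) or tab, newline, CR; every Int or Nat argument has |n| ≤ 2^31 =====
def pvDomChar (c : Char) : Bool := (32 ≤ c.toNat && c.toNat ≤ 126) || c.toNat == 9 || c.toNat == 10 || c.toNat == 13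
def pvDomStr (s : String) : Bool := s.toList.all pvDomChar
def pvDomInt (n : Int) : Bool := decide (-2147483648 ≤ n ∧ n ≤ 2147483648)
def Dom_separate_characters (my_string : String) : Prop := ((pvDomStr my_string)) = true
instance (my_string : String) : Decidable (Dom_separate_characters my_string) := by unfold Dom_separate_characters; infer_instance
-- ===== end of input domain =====

-- B replaces A's single classifying loop with three independent filtering passes, one per bucket (more idiomatic; same cost).


-- ===== PORT A =====
-- character classes of Python's string.ascii_letters / string.punctuation (exact ASCII code ranges)
def pvIsLetter (c : Char) : Bool := (65 ≤ c.toNat && c.toNat ≤ 90) || (97 ≤ c.toNat && c.toNat ≤ 122)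
def pvIsPunct (c : Char) : Bool :=
  (33 ≤ c.toNat && c.toNat ≤ 47) || (58 ≤ c.toNat && c.toNat ≤ 64) ||
  (91 ≤ c.toNat && c.toNat ≤ 96) || (123 ≤ c.toNat && c.toNat ≤ 126)

-- A's single loop: three accumulators, first matching branch wins
def pvStepA (acc : List Char × List Char × List Char) (c : Char) :
    List Char × List Char × List Char :=
  if pvIsLetter c then (acc.1 ++ [c], acc.2.1, acc.2.2)
  else if pvIsPunct c then (acc.1, acc.2.1 ++ [c], acc.2.2)
  else (acc.1, acc.2.1, acc.2.2 ++ [c])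

def separate_characters (my_string : String) : String × String × String :=
  let r := my_string.toList.foldl pvStepA ([], [], [])
  (String.ofList r.1, String.ofList r.2.1, String.ofList r.2.2)

-- ===== PORT B =====
def separate_characters_alt (my_string : String) : String × String × String :=
  (String.ofList (my_string.toList.filter (fun c => pvIsLetter c)),
   String.ofList (my_string.toList.filter (fun c => pvIsPunct c)),
   String.ofList (my_string.toList.filter (fun c => !pvIsLetter c && !pvIsPunct c)))

-- ===== PRECONDITION & SPEC =====
def Spec_separate_characters (my_string : String) (out : String × String × String) : Prop := out = separate_characters_alt my_string
instance (my_string : String) (out : String × String × String) : Decidable (Spec_separate_characters my_string out) := by unfold Spec_separate_characters; infer_instance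

-- ===== CLAIM (what is proved, stated in full; the proofs are below) =====
def Claim_equal_separate_characters : Prop := ∀ (my_string : String), Dom_separate_characters my_string → Spec_separate_characters my_string (separate_characters my_string)

-- ===== LEMMAS AND PROOFS =====

-- the ASCII letter and punctuation ranges are disjoint
theorem pvLet_not_punct (c : Char) (h : pvIsLetter c = true) : pvIsPunct c = false := by
  simp [pvIsLetter, pvIsPunct] at *; omega

-- loop invariant: A's fold appends exactly the three filters to the accumulators
theorem pvFoldA_eq (cs : List Char) : ∀ (x y z : List Char),
    cs.foldl pvStepA (x, y, z) =
      (x ++ cs.filter (fun c => pvIsLetter c),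
       y ++ cs.filter (fun c => pvIsPunct c),
       z ++ cs.filter (fun c => !pvIsLetter c && !pvIsPunct c)) := by
  induction cs with
  | nil => intro x y z; simp
  | cons c cs ih =>
    intro x y z
    by_cases h1 : pvIsLetter c = true
    · simp [pvStepA, h1, ih, pvLet_not_punct c h1]
    · by_cases h2 : pvIsPunct c = true
      · simp [pvStepA, h1, h2, ih]
      · simp [pvStepA, h1, h2, ih]

-- ===== VERDICT (by name: the statement is the Claim_ definition above) =====
theorem separate_characters_spec : Claim_equal_separate_characters := by
  intro s _
  show _ = _
  simp [separate_characters, separate_characters_alt, pvFoldA_eq]
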